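-- pv_equiv track=rewrite | github.com/teaguetomesh/dqva-and-circuit-cutting | utils/helper_fun.py | find_cluster_O_rho_qubit_positions
-- ===== SOURCE A (Python) =====
-- def find_cluster_O_rho_qubit_positions(O_rho_pairs, cluster_circs):
--     cluster_O_qubit_positions = {}
--     cluster_rho_qubit_positions = {}
--     for pair in O_rho_pairs:
--         O_qubit, rho_qubit = pair
--         O_cluster_idx, O_qubit_idx = O_qubit
--         rho_cluster_idx, rho_qubit_idx = rho_qubit
--         if O_cluster_idx not in cluster_O_qubit_positions:
--             cluster_O_qubit_positions[O_cluster_idx] = [O_qubit_idx]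
--         else:
--             cluster_O_qubit_positions[O_cluster_idx].append(O_qubit_idx)
--         if rho_cluster_idx not in cluster_rho_qubit_positions:
--             cluster_rho_qubit_positions[rho_cluster_idx] = [rho_qubit_idx]
--         else:
--             cluster_rho_qubit_positions[rho_cluster_idx].append(rho_qubit_idx)
--     for cluster_idx in range(len(cluster_circs)):
--         if cluster_idx not in cluster_O_qubit_positions:
--             cluster_O_qubit_positions[cluster_idx] = []
--         if cluster_idx not in cluster_rho_qubit_positions:
--             cluster_rho_qubit_positions[cluster_idx] = []
--     return cluster_O_qubit_positions, cluster_rho_qubit_positions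
-- ===== SOURCE B (Python) =====
-- def _group(items, n):
--     keys = list(dict.fromkeys(k for k, _ in items))
--     keys += [i for i in range(n) if i not in keys]
--     return {k: [v for kk, v in items if kk == k] for k in keys}
--
--
-- def find_cluster_O_rho_qubit_positions(O_rho_pairs, cluster_circs):
--     n = len(cluster_circs)
--     O_items = [(p[0][0], p[0][1]) for p in O_rho_pairs]
--     rho_items = [(p[1][0], p[1][1]) for p in O_rho_pairs]
--     return _group(O_items, n), _group(rho_items, n)
-- ===== Notes on version B (the rewrite author's own statement) =====
-- stated objective: alternative
-- what changed: A builds both dicts incrementally (branch per pair: create-or-append, then backfill missing range keys); B first computes the key order (first-appearance keys then missing range indices) and then builds each dict in one comprehension that gathers every key's values by filtering the pairs, via one generic _group helper applied to the O-side and rho-side projections.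
import Mathlib
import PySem

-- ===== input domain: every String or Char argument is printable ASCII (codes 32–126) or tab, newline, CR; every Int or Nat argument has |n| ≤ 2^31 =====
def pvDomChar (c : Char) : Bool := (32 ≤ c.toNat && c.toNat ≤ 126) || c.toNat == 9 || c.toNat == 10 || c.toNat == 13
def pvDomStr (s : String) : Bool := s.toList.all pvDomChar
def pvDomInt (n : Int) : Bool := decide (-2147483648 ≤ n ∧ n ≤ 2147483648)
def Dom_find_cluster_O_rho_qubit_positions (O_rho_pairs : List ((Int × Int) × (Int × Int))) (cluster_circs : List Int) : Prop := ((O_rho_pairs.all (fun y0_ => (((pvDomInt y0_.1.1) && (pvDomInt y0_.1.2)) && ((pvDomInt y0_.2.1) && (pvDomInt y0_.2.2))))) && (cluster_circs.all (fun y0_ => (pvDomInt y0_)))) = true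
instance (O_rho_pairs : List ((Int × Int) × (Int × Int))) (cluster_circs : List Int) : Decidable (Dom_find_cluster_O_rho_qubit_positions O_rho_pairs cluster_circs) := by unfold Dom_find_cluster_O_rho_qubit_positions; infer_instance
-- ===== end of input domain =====

-- ===== PORT A =====
-- B computes the key order up front and gathers each key's values by filtering the
-- pairs (one generic helper for both sides), instead of A's incremental create-or-append
-- dict building with a backfill pass; objective: alternative decomposition, same results.

-- one dict update of A's first loop: create the key with [v] or append v
def pvStepA (d : PySem.Dict Int (List Int)) (k v : Int) : PySem.Dict Int (List Int) :=
  if d.contains k = false then d.insert k [v] else d.modify k [] (fun l => l ++ [v])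

-- one dict update of A's second loop: insert an empty list for a missing cluster index
def pvBackfill (d : PySem.Dict Int (List Int)) (i : Int) : PySem.Dict Int (List Int) :=
  if d.contains i = false then d.insert i [] else d

def find_cluster_O_rho_qubit_positions (O_rho_pairs : List ((Int × Int) × (Int × Int))) (cluster_circs : List Int) : (List (Int × List Int)) × (List (Int × List Int)) :=
  let loop1 := O_rho_pairs.foldl
    (fun (st : PySem.Dict Int (List Int) × PySem.Dict Int (List Int)) pair =>
      (pvStepA st.1 pair.1.1 pair.1.2, pvStepA st.2 pair.2.1 pair.2.2))
    (PySem.Dict.empty, PySem.Dict.empty)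
  let loop2 := (PySem.List.pyRange 0 (cluster_circs.length : Int)).foldl
    (fun st i => (pvBackfill st.1 i, pvBackfill st.2 i)) loop1
  (loop2.1.items, loop2.2.items)

-- ===== PORT B =====
-- port of Source B's _group: keys in first-appearance order, missing range indices appended,
-- then the dict comprehension; its keys are distinct, so it IS this association list
def pvGroup (items : List (Int × Int)) (n : Int) : List (Int × List Int) :=
  let keys := PySem.List.dedup (items.map (fun p => p.1))
  let keys2 := keys ++ (PySem.List.pyRange 0 n).filter (fun i => !(keys.contains i))
  keys2.map (fun k => (k, (items.filter (fun p => p.1 == k)).map (fun p => p.2)))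

def find_cluster_O_rho_qubit_positions_alt (O_rho_pairs : List ((Int × Int) × (Int × Int))) (cluster_circs : List Int) : (List (Int × List Int)) × (List (Int × List Int)) :=
  let n : Int := cluster_circs.length
  (pvGroup (O_rho_pairs.map (fun p => (p.1.1, p.1.2))) n,
   pvGroup (O_rho_pairs.map (fun p => (p.2.1, p.2.2))) n)

-- ===== PRECONDITION & SPEC =====
def Spec_find_cluster_O_rho_qubit_positions (O_rho_pairs : List ((Int × Int) × (Int × Int))) (cluster_circs : List Int) (out : (List (Int × List Int)) × (List (Int × List Int))) : Prop := out = find_cluster_O_rho_qubit_positions_alt O_rho_pairs cluster_circs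
instance (O_rho_pairs : List ((Int × Int) × (Int × Int))) (cluster_circs : List Int) (out : (List (Int × List Int)) × (List (Int × List Int))) : Decidable (Spec_find_cluster_O_rho_qubit_positions O_rho_pairs cluster_circs out) := by unfold Spec_find_cluster_O_rho_qubit_positions; infer_instance

-- ===== CLAIM (what is proved, stated in full; the proofs are below) =====
def Claim_equal_find_cluster_O_rho_qubit_positions : Prop := ∀ (O_rho_pairs : List ((Int × Int) × (Int × Int))) (cluster_circs : List Int), Dom_find_cluster_O_rho_qubit_positions O_rho_pairs cluster_circs → Spec_find_cluster_O_rho_qubit_positions O_rho_pairs cluster_circs (find_cluster_O_rho_qubit_positions O_rho_pairs cluster_circs)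

-- ===== LEMMAS AND PROOFS =====

-- the contents of A's first-loop dict, as a function of the processed (key, value) items
def pvG (its : List (Int × Int)) : List (Int × List Int) :=
  (PySem.List.dedup (its.map (fun p => p.1))).map
    (fun k => (k, (its.filter (fun p => p.1 == k)).map (fun p => p.2)))

lemma pvContains_mk_map (K : List Int) (V : Int → List Int) (k : Int) :
    (PySem.Dict.mk (K.map (fun k => (k, V k))) : PySem.Dict Int (List Int)).contains k
      = decide (k ∈ K) := by
  induction K with
  | nil => rfl
  | cons a t ih =>
    simp only [PySem.Dict.contains, List.map_cons, List.any_cons] at ih ⊢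
    rw [ih]
    by_cases h : a = k
    · subst h; simp
    · simp [h, Ne.symm h]

lemma pvGetD_mk_map (K : List Int) (V : Int → List Int) (k : Int) (d0 : List Int)
    (hk : k ∈ K) :
    (PySem.Dict.mk (K.map (fun k => (k, V k))) : PySem.Dict Int (List Int)).getD k d0 = V k := by
  induction K with
  | nil => cases hk
  | cons a t ih =>
    rcases List.mem_cons.mp hk with h | h
    · subst h
      simp [PySem.Dict.getD, PySem.Dict.get?_mk_cons]
    · by_cases ha : a = k
      · subst ha; simp [PySem.Dict.getD, PySem.Dict.get?_mk_cons]
      · have := ih h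
        simp only [PySem.Dict.getD, List.map_cons, PySem.Dict.get?_mk_cons] at *
        simpa [ha] using this

lemma pvMem_dedup (xs : List Int) (x : Int) : x ∈ PySem.List.dedup xs ↔ x ∈ xs := by
  simpa [PySem.List.dedup] using PySem.Set.mem_ofList xs x

lemma pvDedup_append_singleton (xs : List Int) (x : Int) :
    PySem.List.dedup (xs ++ [x])
      = if x ∈ xs then PySem.List.dedup xs else PySem.List.dedup xs ++ [x] := by
  have h : PySem.List.dedup (xs ++ [x]) = PySem.Set.add (PySem.List.dedup xs) x := by
    simp [PySem.List.dedup, PySem.Set.ofList, List.foldl_append]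
  rw [h]
  unfold PySem.Set.add
  by_cases hx : x ∈ xs
  · have hm : x ∈ PySem.List.dedup xs := (pvMem_dedup xs x).mpr hx
    simp [PySem.Set.contains, hx]
  · have hm : x ∉ PySem.List.dedup xs := fun h' => hx ((pvMem_dedup xs x).mp h')
    simp [PySem.Set.contains, hx]

-- how one pvStepA update acts on a dict in keyed-map form: fresh key appends ...
lemma pvStepA_not_mem (K : List Int) (V : Int → List Int) (k v : Int) (h : k ∉ K) :
    pvStepA (PySem.Dict.mk (K.map (fun k => (k, V k)))) k v
      = PySem.Dict.mk (K.map (fun k => (k, V k)) ++ [(k, [v])]) := by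
  unfold pvStepA PySem.Dict.insert
  rw [pvContains_mk_map]
  simp [h]

-- ... and an existing key gets v appended to its entry, in place
lemma pvStepA_mem (K : List Int) (V : Int → List Int) (k v : Int) (h : k ∈ K) :
    pvStepA (PySem.Dict.mk (K.map (fun k => (k, V k)))) k v
      = PySem.Dict.mk ((K.map (fun k => (k, V k))).map
          (fun p => if p.1 == k then (k, V k ++ [v]) else p)) := by
  unfold pvStepA PySem.Dict.modify PySem.Dict.insert
  rw [pvContains_mk_map, pvGetD_mk_map _ _ _ _ h]
  simp [h]

-- first-loop invariant: the dict after processing `its` is exactly pvG its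
lemma pvLoop1 (its : List (Int × Int)) :
    (its.foldl (fun d p => pvStepA d p.1 p.2) PySem.Dict.empty).items = pvG its := by
  induction its using List.reverseRecOn with
  | nil => rfl
  | append_singleton xs x ih =>
    have hd : (xs.foldl (fun d p => pvStepA d p.1 p.2) PySem.Dict.empty)
        = PySem.Dict.mk (pvG xs) := PySem.Dict.ext ih
    rw [List.foldl_append, List.foldl_cons, List.foldl_nil, hd]
    unfold pvG
    simp only [List.map_append, List.map_cons, List.map_nil]
    by_cases hx : x.1 ∈ xs.map (fun p => p.1)
    · -- key already present: A appends to the existing entry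
      rw [pvDedup_append_singleton, if_pos hx]
      have hmem : x.1 ∈ PySem.List.dedup (xs.map (fun p => p.1)) := (pvMem_dedup _ _).mpr hx
      rw [pvStepA_mem _ _ _ _ hmem]
      show _ = _
      rw [List.map_map]
      apply List.map_congr_left
      intro k hkK
      by_cases hk : k = x.1
      · subst hk
        simp [List.filter_append]
      · have hxk : ¬ (x.1 = k) := fun hh => hk hh.symm
        simp [Function.comp, hk, hxk, List.filter_append]
    · -- new key: A appends a fresh entry at the end
      rw [pvDedup_append_singleton, if_neg hx]
      have hmem : x.1 ∉ PySem.List.dedup (xs.map (fun p => p.1)) :=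
        fun h => hx ((pvMem_dedup _ _).mp h)
      rw [pvStepA_not_mem _ _ _ _ hmem]
      show _ ++ _ = _
      rw [List.map_append]
      congr 1
      · apply List.map_congr_left
        intro k hkK
        have hxk : ¬ (x.1 = k) := fun hh => hx (hh ▸ (pvMem_dedup _ _).mp hkK)
        simp [List.filter_append, hxk]
      · have hnil : xs.filter (fun p => p.1 == x.1) = [] := by
          rw [List.filter_eq_nil_iff]
          intro a ha hax
          exact hx (List.mem_map.mpr ⟨a, ha, beq_iff_eq.mp hax⟩)
        simp [List.filter_append, hnil]

-- second-loop invariant, for a dict in keyed-map form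
lemma pvLoop2 (K : List Int) (V : Int → List Int) (m : Nat) :
    ((PySem.List.pyRange 0 (m : Int)).foldl pvBackfill
        (PySem.Dict.mk (K.map (fun k => (k, V k))))).items
      = K.map (fun k => (k, V k))
        ++ ((PySem.List.pyRange 0 (m : Int)).filter (fun i => !(K.contains i))).map
              (fun i => (i, ([] : List Int))) := by
  induction m with
  | zero =>
    simp [show PySem.List.pyRange 0 ((0 : Nat) : Int) = [] from by decide]
  | succ m ih =>
    have hstep : PySem.List.pyRange 0 (((m + 1 : Nat)) : Int)
        = PySem.List.pyRange 0 (m : Int) ++ [(m : Int)] := by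
      push_cast
      exact PySem.List.pyRange_one_succ_right (by positivity)
    rw [hstep, List.foldl_append, List.foldl_cons, List.foldl_nil]
    have hd : ((PySem.List.pyRange 0 (m : Int)).foldl pvBackfill
          (PySem.Dict.mk (K.map (fun k => (k, V k)))))
        = PySem.Dict.mk (K.map (fun k => (k, V k))
            ++ ((PySem.List.pyRange 0 (m : Int)).filter (fun i => !(K.contains i))).map
                  (fun i => (i, ([] : List Int)))) := PySem.Dict.ext ih
    rw [hd, List.filter_append]
    have hcont : (PySem.Dict.mk (K.map (fun k => (k, V k))
          ++ ((PySem.List.pyRange 0 (m : Int)).filter (fun i => !(K.contains i))).map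
                (fun i => (i, ([] : List Int)))) : PySem.Dict Int (List Int)).contains (m : Int)
        = decide ((m : Int) ∈ K) := by
      unfold PySem.Dict.contains
      rw [List.any_append]
      have h2 : (((PySem.List.pyRange 0 (m : Int)).filter (fun i => !(K.contains i))).map
          (fun i => (i, ([] : List Int)))).any (fun p => p.1 == (m : Int)) = false := by
        simp only [List.any_eq_false]
        intro p hp hpm
        rcases List.mem_map.mp hp with ⟨i, hi, rfl⟩
        have := (PySem.List.mem_pyRange_one).mp (List.mem_filter.mp hi).1
        have : i = (m : Int) := beq_iff_eq.mp hpm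
        omega
      rw [h2, Bool.or_false]
      have := pvContains_mk_map K V (m : Int)
      simpa [PySem.Dict.contains] using this
    by_cases hK : (m : Int) ∈ K
    · have hc2 : _ = true := hcont.trans (decide_eq_true hK)
      unfold pvBackfill
      rw [hc2]
      simp [hK]
    · have hc2 : _ = false := hcont.trans (by simpa using hK)
      unfold pvBackfill
      rw [hc2]
      unfold PySem.Dict.insert
      rw [hc2]
      simp [hK, List.append_assoc]

lemma pvGroup_eq (its : List (Int × Int)) (m : Nat) :
    ((PySem.List.pyRange 0 (m : Int)).foldl pvBackfill
        (its.foldl (fun d p => pvStepA d p.1 p.2) PySem.Dict.empty)).items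
      = pvGroup its (m : Int) := by
  have hd : (its.foldl (fun d p => pvStepA d p.1 p.2) PySem.Dict.empty)
      = PySem.Dict.mk (pvG its) := PySem.Dict.ext (pvLoop1 its)
  rw [hd]
  unfold pvG
  rw [pvLoop2]
  unfold pvGroup
  rw [List.map_append]
  congr 1
  apply List.map_congr_left
  intro i hi
  rcases List.mem_filter.mp hi with ⟨_, hicond⟩
  have hnotin : i ∉ PySem.List.dedup (its.map (fun p => p.1)) := by
    intro h
    rw [Bool.not_eq_eq_eq_not, Bool.not_true, List.contains_eq_any_beq] at hicond
    have := List.any_eq_false.mp hicond i h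
    simp at this
  have hnil : its.filter (fun p => p.1 == i) = [] := by
    rw [List.filter_eq_nil_iff]
    intro a ha hai
    exact hnotin ((pvMem_dedup _ _).mpr (List.mem_map.mpr ⟨a, ha, beq_iff_eq.mp hai⟩))
  simp [hnil]

-- ===== VERDICT (by name: the statement is the Claim_ definition above) =====
theorem find_cluster_O_rho_qubit_positions_spec : Claim_equal_find_cluster_O_rho_qubit_positions := by
  intro pairs cc _
  unfold Spec_find_cluster_O_rho_qubit_positions
  show find_cluster_O_rho_qubit_positions pairs cc = _
  simp only [find_cluster_O_rho_qubit_positions, find_cluster_O_rho_qubit_positions_alt]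
  rw [PySem.List.foldl_prod_mk
      (fun d (pair : (Int × Int) × (Int × Int)) => pvStepA d pair.1.1 pair.1.2)
      (fun d pair => pvStepA d pair.2.1 pair.2.2) pairs PySem.Dict.empty PySem.Dict.empty]
  rw [PySem.List.foldl_prod_mk pvBackfill pvBackfill]
  have h1 : (pairs.foldl (fun d pair => pvStepA d pair.1.1 pair.1.2) PySem.Dict.empty)
      = ((pairs.map (fun p => (p.1.1, p.1.2))).foldl (fun d p => pvStepA d p.1 p.2) PySem.Dict.empty) := by
    rw [List.foldl_map]
  have h2 : (pairs.foldl (fun d pair => pvStepA d pair.2.1 pair.2.2) PySem.Dict.empty)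
      = ((pairs.map (fun p => (p.2.1, p.2.2))).foldl (fun d p => pvStepA d p.1 p.2) PySem.Dict.empty) := by
    rw [List.foldl_map]
  rw [h1, h2, pvGroup_eq, pvGroup_eq]
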